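-- pv_equiv track=rewrite | github.com/dikoko/practice | 2 Sequences/2-30_alternative_sort.py | alternative_sort
-- ===== SOURCE A (Python) =====
-- def alternative_sort(nums):
--     if not nums: return
--     len_nums = len(nums)
--
--     nums.sort()
--     for i in range(0, len_nums-1, 2):
--         temp_max = nums[len_nums-1]
--         nums[i+1:] = nums[i:len_nums-1]
--         nums[i] = temp_max
--
--     return nums
-- ===== SOURCE B (Python) =====
-- def alternative_sort(nums):
--     if not nums:
--         return
--     srt = sorted(nums)
--     n = len(nums)
--     low = srt[:n // 2]
--     high = srt[n // 2:][::-1]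
--     result = []
--     for h, l in zip(high, low):
--         result.append(h)
--         result.append(l)
--     if len(high) > len(low):
--         result.append(high[-1])
--     nums[:] = result
--     return nums
-- ===== Notes on version B (the rewrite author's own statement) =====
-- stated objective: faster
-- what changed: A repeatedly rewrites the whole tail with slice assignments inside its loop (quadratic data movement); B sorts once, splits the sorted list into a low half and a reversed high half, and interleaves them with one zip pass.
-- outside the precondition, e.g. on alternative_sort([]): A returns None, B returns None
import Mathlib
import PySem

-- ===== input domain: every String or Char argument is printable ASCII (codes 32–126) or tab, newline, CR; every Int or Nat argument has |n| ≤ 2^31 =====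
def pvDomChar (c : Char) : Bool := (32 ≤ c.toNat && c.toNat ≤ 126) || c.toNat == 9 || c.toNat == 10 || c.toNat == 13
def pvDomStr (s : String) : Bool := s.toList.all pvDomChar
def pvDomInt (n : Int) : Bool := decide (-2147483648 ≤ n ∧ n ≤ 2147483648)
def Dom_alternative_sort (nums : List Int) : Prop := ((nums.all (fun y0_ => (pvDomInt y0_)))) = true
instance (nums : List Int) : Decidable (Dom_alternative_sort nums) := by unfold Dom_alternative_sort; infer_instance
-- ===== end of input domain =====

-- B replaces A's in-loop slice rewriting by one sort + split + zip interleave (measured faster);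
-- both Pythons mutate `nums` in place the same way, the theorems are about the returned value.


-- ===== PORT A =====
-- loop body of A: temp_max = nums[len_nums-1]; nums[i+1:] = nums[i:len_nums-1]; nums[i] = temp_max
def altStep (len_nums : Int) (lst : List Int) (i : Int) : List Int :=
  let temp_max := PySem.List.pyGetD lst (len_nums - 1) 0
  let lst2 := PySem.List.slice lst none (some (i + 1)) ++
              PySem.List.slice lst (some i) (some (len_nums - 1))
  PySem.List.pySetD lst2 i temp_max

def alternative_sort (nums : List Int) : List Int :=
  if nums = [] then []   -- Python A returns None here; excluded by Pre_
  else
    let len_nums : Int := nums.length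
    let sorted_nums := PySem.List.sorted nums id false
    (PySem.List.pyRange 0 (len_nums - 1) 2).foldl (altStep len_nums) sorted_nums

-- ===== PORT B =====
def alternative_sort_alt (nums : List Int) : List Int :=
  if nums = [] then []   -- Python B returns None here; excluded by Pre_
  else
    let srt := PySem.List.sorted nums id false
    let n : Int := nums.length
    let low := PySem.List.slice srt none (some (n / 2))
    let high := (PySem.List.slice srt (some (n / 2)) none).reverse
    let result := (high.zip low).foldl (fun r p => (r ++ [p.1]) ++ [p.2]) []
    if high.length > low.length then result ++ [PySem.List.pyGetD high (-1) 0]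
    else result

-- ===== PRECONDITION & SPEC =====
-- Pre_ excludes only the empty list, on which both Pythons return None, which is not a list[int].
def Pre_alternative_sort (nums : List Int) : Prop := nums ≠ []
instance (nums : List Int) : Decidable (Pre_alternative_sort nums) := by
  unfold Pre_alternative_sort; infer_instance
def pvWitness_alternative_sort : List Int := [3, 1, 2]
def Spec_alternative_sort (nums : List Int) (out : List Int) : Prop := out = alternative_sort_alt nums
instance (nums : List Int) (out : List Int) : Decidable (Spec_alternative_sort nums out) := by unfold Spec_alternative_sort; infer_instance

-- ===== CLAIM (what is proved, stated in full; the proofs are below) =====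
def Claim_equal_alternative_sort : Prop := ∀ (nums : List Int), Dom_alternative_sort nums → Pre_alternative_sort nums → Spec_alternative_sort nums (alternative_sort nums)

-- ===== LEMMAS AND PROOFS =====

-- the common value: interleave a list's ends, largest first
def ialt : List Int → List Int
  | [] => []
  | [a] => [a]
  | a :: b :: t => (b :: t).getLastD 0 :: a :: ialt ((b :: t).dropLast)
termination_by s => s.length
decreasing_by simp

lemma ialt_cons (a : Int) (M : List Int) (h : M ≠ []) :
    ialt (a :: M) = M.getLastD 0 :: a :: ialt M.dropLast := by
  obtain ⟨m1, t, rfl⟩ := List.exists_cons_of_ne_nil h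
  rw [ialt]

lemma pyRange_two_nil (a b : Int) (h : b ≤ a) : PySem.List.pyRange a b 2 = [] := by
  rw [PySem.List.pyRange_of_pos a b (by norm_num)]
  simp [if_neg (by omega : ¬ a < b)]

lemma pyRange_two_cons (a b : Int) (h : a < b) :
    PySem.List.pyRange a b 2 = a :: PySem.List.pyRange (a + 2) b 2 := by
  rw [PySem.List.pyRange_of_pos a b (by norm_num), PySem.List.pyRange_of_pos (a+2) b (by norm_num)]
  by_cases h2 : a + 2 < b
  · rw [if_pos h, if_pos h2]
    have hk : ((b - a + 2 - 1) / 2).toNat = ((b - (a+2) + 2 - 1) / 2).toNat + 1 := by omega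
    rw [hk, List.range_succ_eq_map, List.map_cons, List.map_map]
    refine List.cons_eq_cons.mpr ⟨by norm_num, ?_⟩
    apply List.map_congr_left
    intro k _
    simp [Function.comp]
    ring
  · rw [if_pos h, if_neg h2]
    have hk : ((b - a + 2 - 1) / 2).toNat = 1 := by omega
    simp [hk, List.range_succ]

lemma set_append_len (P X : List Int) (x v : Int) :
    (P ++ x :: X).set P.length v = P ++ v :: X := by
  induction P with
  | nil => simp
  | cons p P ih => simp [ih]

lemma altStep_eq (n : Int) (P : List Int) (m0 : Int) (M' : List Int) (hM' : M' ≠ [])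
    (hn : n = P.length + (m0 :: M').length) :
    altStep n (P ++ m0 :: M') (P.length : Int) =
      (P ++ [(m0 :: M').getLastD 0, m0]) ++ M'.dropLast := by
  obtain ⟨m1, t, rfl⟩ := List.exists_cons_of_ne_nil hM'
  simp only [List.length_cons] at hn
  unfold altStep
  have h1 : n - 1 = ((P.length + t.length + 1 : Nat) : Int) := by omega
  have h2 : (P.length : Int) + 1 = ((P.length + 1 : Nat) : Int) := by omega
  rw [h1, h2]
  rw [PySem.List.pyGetD_natCast, PySem.List.slice_to_natCast, PySem.List.slice_natCast,
      PySem.List.pySetD_natCast]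
  have hne : (m0 :: m1 :: t) ≠ [] := by simp
  have hget : (P ++ m0 :: m1 :: t).getD (P.length + t.length + 1) 0
      = (m0 :: m1 :: t).getLastD 0 := by
    have hlt : P.length + t.length + 1 < (P ++ m0 :: m1 :: t).length := by simp; omega
    rw [List.getD_eq_getElem _ _ hlt, List.getElem_append_right (by omega)]
    have h4 : (m0 :: m1 :: t).getLastD 0 = (m0 :: m1 :: t).getLast hne := by
      simp [List.getLastD_eq_getLast?, List.getLast?_eq_some_getLast hne]
    rw [h4, List.getLast_eq_getElem]
    congr 1
    simp
    omega
  have htake : (P ++ m0 :: m1 :: t).take (P.length + 1) = P ++ [m0] := by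
    rw [List.take_append]
    simp [List.take_of_length_le (by omega : P.length ≤ P.length + 1)]
  have hdroptake : ((P ++ m0 :: m1 :: t).drop P.length).take (P.length + t.length + 1 - P.length)
      = m0 :: (m1 :: t).dropLast := by
    rw [List.drop_left, show P.length + t.length + 1 - P.length = t.length + 1 by omega]
    rw [List.take_succ_cons, List.dropLast_eq_take]
    simp
  rw [hget, htake, hdroptake]
  rw [show (P ++ [m0]) ++ m0 :: (m1 :: t).dropLast = P ++ m0 :: m0 :: (m1 :: t).dropLast by simp,
      set_append_len]
  simp

lemma loopA_inv (n : Int) : ∀ (fuel : Nat) (M P : List Int), M.length ≤ fuel →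
    n = P.length + M.length →
    (PySem.List.pyRange (P.length : Int) (n - 1) 2).foldl (altStep n) (P ++ M) = P ++ ialt M := by
  intro fuel
  induction fuel with
  | zero =>
    intro M P hf hn
    have : M = [] := List.length_eq_zero_iff.mp (by omega)
    subst this
    rw [pyRange_two_nil _ _ (by simp only [List.length_nil] at hn; omega)]
    rw [ialt]
    simp
  | succ fuel ih =>
    intro M P hf hn
    match M with
    | [] =>
      rw [pyRange_two_nil _ _ (by simp only [List.length_nil] at hn; omega)]
      rw [ialt]
      simp
    | [a] =>
      rw [pyRange_two_nil _ _ (by simp only [List.length_cons, List.length_nil] at hn; omega)]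
      rw [ialt]
      simp
    | m0 :: m1 :: t =>
      have hM' : (m1 :: t) ≠ [] := by simp
      have hlt : (P.length : Int) < n - 1 := by
        simp only [List.length_cons] at hn; omega
      rw [pyRange_two_cons _ _ hlt, List.foldl_cons,
          altStep_eq n P m0 (m1 :: t) hM' (by simpa using hn)]
      have hgl : (m0 :: m1 :: t).getLastD 0 = (m1 :: t).getLastD 0 := by
        simp [List.getLastD_eq_getLast?, List.getLast?_eq_some_getLast hM']
      have hres := ih ((m1 :: t).dropLast) (P ++ [(m1 :: t).getLastD 0, m0])
        (by simp only [List.length_cons] at hf; simp only [List.length_dropLast, List.length_cons]; omega)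
        (by simp only [List.length_cons] at hn
            simp only [List.length_append, List.length_cons, List.length_dropLast,
              List.length_nil]
            omega)
      have hP' : ((P ++ [(m1 :: t).getLastD 0, m0]).length : Int) = (P.length : Int) + 2 := by
        simp
      rw [hP'] at hres
      rw [hgl, hres, ialt_cons m0 (m1 :: t) hM']
      simp

lemma foldl_pairs (l : List (Int × Int)) : ∀ acc : List Int,
    l.foldl (fun r p => (r ++ [p.1]) ++ [p.2]) acc = acc ++ l.flatMap (fun p => [p.1, p.2]) := by
  induction l with
  | nil => intro acc; simp
  | cons p l ih =>
    intro acc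
    rw [List.foldl_cons, ih, List.flatMap_cons]
    simp

-- B's core computation on an already-sorted list, in take/drop form
def bcore (s : List Int) : List Int :=
  if ((s.drop (s.length / 2)).reverse).length > (s.take (s.length / 2)).length then
    (((s.drop (s.length / 2)).reverse.zip (s.take (s.length / 2))).foldl
      (fun r p => (r ++ [p.1]) ++ [p.2]) []) ++ [PySem.List.pyGetD (s.drop (s.length / 2)).reverse (-1) 0]
  else
    ((s.drop (s.length / 2)).reverse.zip (s.take (s.length / 2))).foldl
      (fun r p => (r ++ [p.1]) ++ [p.2]) []

lemma bcore_step (a b : Int) (t : List Int) :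
    bcore (a :: (t ++ [b])) = b :: a :: bcore t := by
  unfold bcore
  have hk : (a :: (t ++ [b])).length / 2 = t.length / 2 + 1 := by simp; omega
  have hk' : t.length / 2 ≤ t.length := Nat.div_le_self _ _
  rw [hk]
  have hlow : (a :: (t ++ [b])).take (t.length / 2 + 1) = a :: t.take (t.length / 2) := by
    rw [List.take_succ_cons, List.take_append]
    simp [show t.length / 2 - t.length = 0 by omega]
  have hhigh : ((a :: (t ++ [b])).drop (t.length / 2 + 1)).reverse
      = b :: (t.drop (t.length / 2)).reverse := by
    rw [List.drop_succ_cons, List.drop_append]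
    simp [show t.length / 2 - t.length = 0 by omega]
  rw [hlow, hhigh, List.zip_cons_cons, List.foldl_cons]
  rw [foldl_pairs, foldl_pairs]
  have hcond : (b :: (t.drop (t.length / 2)).reverse).length > (a :: t.take (t.length / 2)).length
      ↔ (t.drop (t.length / 2)).reverse.length > (t.take (t.length / 2)).length := by
    simp
  by_cases hc : (t.drop (t.length / 2)).reverse.length > (t.take (t.length / 2)).length
  · rw [if_pos (by simpa [hcond] using hc), if_pos hc]
    have hne : (t.drop (t.length / 2)).reverse ≠ [] := by
      intro h
      rw [h] at hc
      simp at hc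
    rw [PySem.List.pyGetD_neg_one _ _ (by simp : (b :: (t.drop (t.length / 2)).reverse) ≠ []),
        PySem.List.pyGetD_neg_one _ _ hne, List.getLast_cons hne]
    simp
  · rw [if_neg (by simpa [hcond] using hc), if_neg hc]
    simp

lemma bcore_eq_ialt : ∀ (fuel : Nat) (s : List Int), s.length ≤ fuel → bcore s = ialt s := by
  intro fuel
  induction fuel with
  | zero =>
    intro s hf
    have : s = [] := List.length_eq_zero_iff.mp (by omega)
    subst this
    rw [ialt]
    rfl
  | succ fuel ih =>
    intro s hf
    match s with
    | [] => rw [ialt]; rfl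
    | [a] =>
      rw [ialt]
      simp [bcore, PySem.List.pyGetD, PySem.List.pyGet?, PySem.List.pyIdx?]
    | a :: m1 :: t' =>
      have hne : (m1 :: t') ≠ [] := by simp
      have hdec : a :: m1 :: t' = a :: ((m1 :: t').dropLast ++ [(m1 :: t').getLast hne]) := by
        rw [List.dropLast_concat_getLast hne]
      rw [hdec, bcore_step]
      rw [ih _ (by simp at hf ⊢; omega)]
      rw [← hdec, ialt_cons a (m1 :: t') hne]
      simp [List.getLastD_eq_getLast?, List.getLast?_eq_some_getLast hne]

-- ===== VERDICT (by name: the statement is the Claim_ definition above) =====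
theorem alternative_sort_spec : Claim_equal_alternative_sort := by
  intro nums _ hpre
  unfold Spec_alternative_sort alternative_sort alternative_sort_alt
  rw [if_neg hpre, if_neg hpre]
  dsimp only
  set s := PySem.List.sorted nums id false with hs
  have hlen : s.length = nums.length := by rw [hs]; exact PySem.List.length_sorted _ _ _
  -- A side
  have hA : (PySem.List.pyRange 0 ((nums.length : Int) - 1) 2).foldl
      (altStep (nums.length : Int)) s = ialt s := by
    have := loopA_inv (nums.length : Int) s.length s [] (le_refl _) (by simp [hlen])
    simpa using this
  rw [hA]
  -- B side
  have hdiv : ((nums.length : Int)) / 2 = ((nums.length / 2 : Nat) : Int) := by omega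
  rw [hdiv, PySem.List.slice_to_natCast, PySem.List.slice_from_natCast]
  have hB : (if ((s.drop (nums.length / 2)).reverse.length > (s.take (nums.length / 2)).length) then
        (((s.drop (nums.length / 2)).reverse.zip (s.take (nums.length / 2))).foldl
          (fun r p => (r ++ [p.1]) ++ [p.2]) []) ++ [PySem.List.pyGetD (s.drop (nums.length / 2)).reverse (-1) 0]
      else ((s.drop (nums.length / 2)).reverse.zip (s.take (nums.length / 2))).foldl
          (fun r p => (r ++ [p.1]) ++ [p.2]) []) = bcore s := by
    unfold bcore
    rw [hlen]
  rw [hB, bcore_eq_ialt s.length s (le_refl _)]
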